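-- pv_equiv track=rewrite | github.com/Jasson-01/UBA-IP-2024 | Parciales_Python/Parcial-10-(2C-2024)/Tests-python-tn/solucion.py | longitud_mas_grande
-- ===== SOURCE A (Python) =====
-- def longitud_mas_grande(m: list[list[int]]) -> int:
--     longitud_maxima = 0
--     longitud_actual = 0
--
--     for indice_fila in range(len (m)):
--         longitud_actual = 0
--         for indice_columna in range (len(m[indice_fila])):
--             if m[indice_fila][indice_columna] == 1:
--                 longitud_actual += 1
--             else:
--                 if longitud_actual > 0: # si termino una secuencia de 1s
--                     if longitud_actual > longitud_maxima: # si encontré nuevo max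
--                         longitud_maxima = longitud_actual
--                     longitud_actual = 0
--
--         # lo siguiente puede ocurrir si la fila termina con 1
--         if longitud_actual > longitud_maxima: # si encontré nuevo max
--             longitud_maxima = longitud_actual
--
--     return longitud_maxima
-- ===== SOURCE B (Python) =====
-- def longitud_mas_grande(m: list[list[int]]) -> int:
--     best = 0
--     for row in m:
--         n = len(row)
--         i = 0
--         while i < n:
--             j = i + 1
--             while j < n and row[j] == row[i]:
--                 j += 1
--             if row[i] == 1 and j - i > best:
--                 best = j - i
--             i = j
--     return best
-- ===== Notes on version B (the rewrite author's own statement) =====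
-- stated objective: alternative
-- what changed: Replaces A's incremental counter-with-reset sweep by a two-pointer run-splitting pass: each row is decomposed into maximal runs of equal values and only runs of 1s update the maximum.
import Mathlib
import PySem

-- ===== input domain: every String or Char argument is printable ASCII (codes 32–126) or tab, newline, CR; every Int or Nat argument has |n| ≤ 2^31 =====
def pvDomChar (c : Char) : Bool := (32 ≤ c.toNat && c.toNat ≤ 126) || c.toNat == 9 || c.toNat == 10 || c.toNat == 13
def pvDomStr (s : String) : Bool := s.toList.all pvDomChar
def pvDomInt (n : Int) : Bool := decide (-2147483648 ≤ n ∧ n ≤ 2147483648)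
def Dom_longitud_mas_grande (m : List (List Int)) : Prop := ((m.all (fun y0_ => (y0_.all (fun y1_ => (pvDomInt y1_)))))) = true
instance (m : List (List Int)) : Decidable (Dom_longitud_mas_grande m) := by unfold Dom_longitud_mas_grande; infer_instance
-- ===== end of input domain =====

-- B replaces A's counter/reset sweep by splitting each row into maximal runs of equal
-- values and taking the longest run of 1s; alternative decomposition, same cost.

-- ===== PORT A =====
-- the body of A's inner loop: state = (longitud_maxima, longitud_actual)
def stepA (st : Int × Int) (v : Int) : Int × Int :=
  if v == 1 then (st.1, st.2 + 1)
  else if st.2 > 0 then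
    (if st.2 > st.1 then st.2 else st.1, 0)
  else st

def longitud_mas_grande (m : List (List Int)) : Int :=
  m.foldl (fun longitud_maxima fila =>
    let p := fila.foldl stepA (longitud_maxima, 0)
    if p.2 > p.1 then p.2 else p.1) 0

-- ===== PORT B =====
-- B's inner two-pointer scan: split the row into maximal runs (value, length)
def runsB : List Int → List (Int × Int)
  | [] => []
  | x :: xs =>
    (x, 1 + ((xs.takeWhile (· == x)).length : Int)) :: runsB (xs.dropWhile (· == x))
termination_by l => l.length
decreasing_by
  simp only [List.length_cons]
  exact Nat.lt_succ_of_le (List.length_dropWhile_le _ _)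

-- `if row[i] == 1 and j - i > best: best = j - i`
def stepB (b : Int) (kn : Int × Int) : Int :=
  if kn.1 == 1 && kn.2 > b then kn.2 else b

def longitud_mas_grande_alt (m : List (List Int)) : Int :=
  m.foldl (fun best fila => (runsB fila).foldl stepB best) 0

-- ===== PRECONDITION & SPEC =====
def Spec_longitud_mas_grande (m : List (List Int)) (out : Int) : Prop := out = longitud_mas_grande_alt m
instance (m : List (List Int)) (out : Int) : Decidable (Spec_longitud_mas_grande m out) := by unfold Spec_longitud_mas_grande; infer_instance

-- ===== CLAIM (what is proved, stated in full; the proofs are below) =====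
def Claim_equal_longitud_mas_grande : Prop := ∀ (m : List (List Int)), Dom_longitud_mas_grande m → Spec_longitud_mas_grande m (longitud_mas_grande m)

-- ===== LEMMAS AND PROOFS =====

-- reference form of A's per-row computation: counter sweep with final flush
def fA (mx cur : Int) : List Int → Int
  | [] => if cur > mx then cur else mx
  | x :: xs => if x = 1 then fA mx (cur + 1) xs else fA (if cur > mx then cur else mx) 0 xs

theorem fA_nonneg (xs : List Int) (mx cur : Int) (hmx : 0 ≤ mx) (hcur : 0 ≤ cur) :
    0 ≤ fA mx cur xs := by
  induction xs generalizing mx cur with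
  | nil => simp only [fA]; split <;> omega
  | cons x xs ih =>
    simp only [fA]
    by_cases hx : x = 1
    · rw [if_pos hx]; exact ih mx (cur + 1) hmx (by omega)
    · rw [if_neg hx]; exact ih _ 0 (by split <;> omega) le_rfl

theorem foldl_stepA_eq_fA (xs : List Int) (mx cur : Int) (hmx : 0 ≤ mx) (hcur : 0 ≤ cur) :
    (if (xs.foldl stepA (mx, cur)).2 > (xs.foldl stepA (mx, cur)).1
      then (xs.foldl stepA (mx, cur)).2 else (xs.foldl stepA (mx, cur)).1)
      = fA mx cur xs := by
  induction xs generalizing mx cur with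
  | nil => simp [fA]
  | cons x xs ih =>
    simp only [List.foldl_cons, fA, stepA]
    by_cases hx : x = 1
    · have hbx : (x == 1) = true := by simp [hx]
      rw [hbx, if_pos rfl, if_pos hx]
      exact ih mx (cur + 1) hmx (by omega)
    · have hbx : (x == 1) = false := by simp [hx]
      simp only [hbx, Bool.false_eq_true, if_false, if_neg hx]
      by_cases hc : cur > 0
      · rw [if_pos hc]
        exact ih _ 0 (by split <;> omega) le_rfl
      · rw [if_neg hc]
        have hc0 : cur = 0 := by omega
        subst hc0
        have hmm : (if (0:Int) > mx then (0:Int) else mx) = mx := by omega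
        rw [hmm]
        exact ih mx 0 hmx le_rfl

theorem ones_block (t r : List Int) (mx cur : Int) (h : ∀ a ∈ t, a = 1) :
    fA mx cur (t ++ r) = fA mx (cur + (t.length : Int)) r := by
  induction t generalizing cur with
  | nil => simp
  | cons a t ih =>
    have ha : a = 1 := h a (by simp)
    simp only [List.cons_append, fA, if_pos ha]
    rw [ih (cur + 1) (fun b hb => h b (by simp [hb]))]
    congr 1
    push_cast [List.length_cons]
    ring

theorem non1_block (t r : List Int) (mx : Int) (h : ∀ a ∈ t, a ≠ 1) (hmx : 0 ≤ mx) :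
    fA mx 0 (t ++ r) = fA mx 0 r := by
  induction t with
  | nil => simp
  | cons a t ih =>
    have ha : a ≠ 1 := h a (by simp)
    simp only [List.cons_append, fA, if_neg ha]
    have hmm : (if (0:Int) > mx then (0:Int) else mx) = mx := by omega
    rw [hmm]
    exact ih (fun b hb => h b (by simp [hb]))

theorem dropWhile_head_false {p : Int → Bool} : ∀ (l : List Int) (y : Int) (r : List Int),
    l.dropWhile p = y :: r → p y = false := by
  intro l
  induction l with
  | nil => intro y r h; simp [List.dropWhile] at h
  | cons a l ih =>
    intro y r h
    by_cases hp : p a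
    · rw [List.dropWhile_cons_of_pos hp] at h
      exact ih y r h
    · rw [List.dropWhile_cons_of_neg hp] at h
      cases h
      simpa using hp

theorem fA_eq_runsB : ∀ (n : ℕ) (xs : List Int) (mx : Int), xs.length ≤ n → 0 ≤ mx →
    fA mx 0 xs = (runsB xs).foldl stepB mx := by
  intro n
  induction n with
  | zero =>
    intro xs mx hlen hmx
    have hnil : xs = [] := by
      cases xs with
      | nil => rfl
      | cons a l => simp at hlen
    subst hnil
    simp [fA, runsB]
    omega
  | succ n ih =>
    intro xs mx hlen hmx
    cases xs with
    | nil => simp [fA, runsB]; omega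
    | cons x xs' =>
      set t := xs'.takeWhile (· == x) with ht
      set r := xs'.dropWhile (· == x) with hr
      have hsplit : xs' = t ++ r := (List.takeWhile_append_dropWhile).symm
      have htlen : t.length + r.length = xs'.length := by
        conv_rhs => rw [hsplit]
        simp
      have hrlen : r.length ≤ n := by
        simp only [List.length_cons] at hlen; omega
      have hruns : runsB (x :: xs') = (x, 1 + (t.length : Int)) :: runsB r := by
        rw [runsB]
      have htmem : ∀ a ∈ t, a = x := by
        intro a ha
        have h2 := List.mem_takeWhile_imp (ht ▸ ha)
        simpa using h2
      by_cases hx : x = 1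
      · -- first run is a run of ones, of length 1 + t.length
        subst hx
        have hfull : (1 : Int) :: xs' = ((1 : Int) :: t) ++ r := by
          rw [hsplit]; rfl
        have h1 : fA mx 0 ((1 : Int) :: xs') = fA mx (1 + (t.length : Int)) r := by
          rw [hfull, ones_block ((1 : Int) :: t) r mx 0
            (fun a ha => by
              rcases List.mem_cons.mp ha with h | h
              · exact h
              · exact htmem a h)]
          congr 1
          push_cast [List.length_cons]
          ring
        set newmx : Int := if 1 + (t.length : Int) > mx then 1 + (t.length : Int) else mx
          with hnew
        have hnewmx : 0 ≤ newmx := by rw [hnew]; split <;> omega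
        have hstep : stepB mx ((1 : Int), 1 + (t.length : Int)) = newmx := by
          simp only [stepB, hnew, beq_self_eq_true, Bool.true_and, decide_eq_true_eq]
        rw [hruns, List.foldl_cons, hstep, h1]
        cases hrc : r with
        | nil =>
          simp only [runsB, List.foldl_nil, fA, hnew]
        | cons y r' =>
          have hy : y ≠ 1 := by
            have hd := dropWhile_head_false xs' y r' (hr ▸ hrc)
            simpa using hd
          have h2 : fA mx (1 + (t.length : Int)) (y :: r') = fA newmx 0 r' := by
            simp only [fA, if_neg hy, ← hnew]
          have h3 : fA newmx 0 (y :: r') = fA newmx 0 r' := by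
            simp only [fA, if_neg hy]
            have hmm : (if (0:Int) > newmx then (0:Int) else newmx) = newmx := by omega
            rw [hmm]
          rw [h2, ← h3]
          exact ih (y :: r') newmx (hrc ▸ hrlen) hnewmx
      · -- first run has key ≠ 1: contributes nothing on either side
        have h1 : fA mx 0 (x :: xs') = fA mx 0 r := by
          rw [fA, if_neg hx]
          have hmm : (if (0:Int) > mx then (0:Int) else mx) = mx := by omega
          rw [hmm]
          conv_lhs => rw [hsplit]
          exact non1_block t r mx (fun a ha => by rw [htmem a ha]; exact hx) hmx
        have hstep : stepB mx (x, 1 + (t.length : Int)) = mx := by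
          simp [stepB, hx]
        rw [hruns, List.foldl_cons, hstep, h1]
        exact ih r mx hrlen hmx

theorem outer_fold (m : List (List Int)) : ∀ acc : Int, 0 ≤ acc →
    m.foldl (fun longitud_maxima fila =>
      let p := fila.foldl stepA (longitud_maxima, 0)
      if p.2 > p.1 then p.2 else p.1) acc
    = m.foldl (fun best fila => (runsB fila).foldl stepB best) acc := by
  induction m with
  | nil => intro acc _; rfl
  | cons fila m ih =>
    intro acc hacc
    simp only [List.foldl_cons]
    have h1 : (if (fila.foldl stepA (acc, 0)).2 > (fila.foldl stepA (acc, 0)).1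
        then (fila.foldl stepA (acc, 0)).2 else (fila.foldl stepA (acc, 0)).1)
        = (runsB fila).foldl stepB acc := by
      rw [foldl_stepA_eq_fA fila acc 0 hacc le_rfl]
      exact fA_eq_runsB fila.length fila acc le_rfl hacc
    rw [show (let p := fila.foldl stepA (acc, 0);
        if p.2 > p.1 then p.2 else p.1) = (runsB fila).foldl stepB acc from h1]
    exact ih _ (by
      rw [← h1, foldl_stepA_eq_fA fila acc 0 hacc le_rfl]
      exact fA_nonneg fila acc 0 hacc le_rfl)

-- ===== VERDICT (by name: the statement is the Claim_ definition above) =====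
theorem longitud_mas_grande_spec : Claim_equal_longitud_mas_grande := by
  intro m _
  unfold Spec_longitud_mas_grande longitud_mas_grande longitud_mas_grande_alt
  exact outer_fold m 0 le_rfl
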